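-- pv_equiv track=rewrite | github.com/DrackXull/GrancelorEmporium | backend/engine/damage_adapter.py | histogram_binned
-- ===== SOURCE A (Python) =====
-- from typing import Dict, Iterable, Tuple, List, Any, Optional
--
-- def histogram_binned(values: List[int], bin_size: int = 1) -> Dict[str, int]:
--     """
--     Returns a dict of {"binLabel": count}, where binLabel is a string range:
--       e.g., with bin_size=5 → "0-4","5-9","10-14",...
--     If bin_size == 1, labels are exact values as strings.
--     """
--     if not values:
--         return {}
--     if bin_size <= 1:
--         out: Dict[str, int] = {}
--         for v in values:
--             k = str(int(v))
--             out[k] = out.get(k, 0) + 1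
--         return out
--
--     m = min(values)
--     M = max(values)
--     out: Dict[str, int] = {}
--     start = (m // bin_size) * bin_size
--     end = ((M // bin_size) + 1) * bin_size
--     for v in values:
--         bucket = ((v - start) // bin_size)
--         lo = start + bucket * bin_size
--         hi = lo + bin_size - 1
--         label = f"{lo}-{hi}"
--         out[label] = out.get(label, 0) + 1
--     return out
-- ===== SOURCE B (Python) =====
-- from typing import Dict, List
--
-- def histogram_binned(values: List[int], bin_size: int = 1) -> Dict[str, int]:
--     # Partition scheme: repeatedly take the first remaining key, count all its
--     # occurrences at once, and filter them out -- no running per-key counts.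
--     if bin_size <= 1:
--         keys = [int(v) for v in values]
--     else:
--         keys = [v // bin_size for v in values]
--     out: Dict[str, int] = {}
--     while keys:
--         k = keys[0]
--         if bin_size <= 1:
--             label = str(k)
--         else:
--             lo = k * bin_size
--             label = f"{lo}-{lo + bin_size - 1}"
--         out[label] = keys.count(k)
--         keys = [x for x in keys if x != k]
--     return out
-- ===== Notes on version B (the rewrite author's own statement) =====
-- stated objective: alternative
-- what changed: A keeps running per-label counts in a dict during one pass; B maintains no running counts at all: it repeatedly takes the first remaining bucket key, counts all its occurrences with list.count, emits its label once, and filters those occurrences out (a partition/unique-then-count scheme), trading speed on many-distinct inputs for a count-free loop.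
import Mathlib
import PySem

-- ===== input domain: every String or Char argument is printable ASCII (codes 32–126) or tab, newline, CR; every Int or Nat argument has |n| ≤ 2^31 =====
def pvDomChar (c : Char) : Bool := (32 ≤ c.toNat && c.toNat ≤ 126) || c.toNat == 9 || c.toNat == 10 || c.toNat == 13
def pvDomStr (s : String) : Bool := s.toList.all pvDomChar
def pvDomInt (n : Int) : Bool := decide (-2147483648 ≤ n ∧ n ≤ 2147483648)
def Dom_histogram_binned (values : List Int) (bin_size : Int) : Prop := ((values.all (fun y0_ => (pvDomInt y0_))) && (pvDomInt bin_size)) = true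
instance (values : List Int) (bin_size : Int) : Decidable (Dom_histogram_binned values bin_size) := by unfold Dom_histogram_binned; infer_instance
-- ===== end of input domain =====

-- B replaces A's one-pass dict of running per-label counts by a partition scheme with no
-- running counts: repeatedly take the first remaining bucket key, count all its occurrences
-- with list.count, emit its label once, and filter those occurrences out (alternative
-- decomposition; same return value; dict ported as its items list).

-- ===== PORT A =====
def histogram_binned (values : List Int) (bin_size : Int) : List (String × Int) :=
  if values = [] then []
  else if bin_size ≤ 1 then
    (values.foldl (fun (out : PySem.Dict String Int) v =>
        let k := PySem.Int.toStr v
        out.insert k (out.getD k 0 + 1)) PySem.Dict.empty).items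
  else
    match values with
    | [] => []  -- unreachable: values ≠ []
    | v0 :: vs =>
      let m := vs.foldl min v0          -- min(values)
      let M := vs.foldl max v0          -- max(values)
      let start := (PySem.Int.floordiv m bin_size) * bin_size
      let _end := ((PySem.Int.floordiv M bin_size) + 1) * bin_size
      (values.foldl (fun (out : PySem.Dict String Int) v =>
          let bucket := PySem.Int.floordiv (v - start) bin_size
          let lo := start + bucket * bin_size
          let hi := lo + bin_size - 1
          let label := PySem.Int.toStr lo ++ "-" ++ PySem.Int.toStr hi
          out.insert label (out.getD label 0 + 1)) PySem.Dict.empty).items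

-- ===== PORT B =====
-- the while loop of Source B: distinct-first partition; each round consumes one bucket
def pvLoopB (bin_size : Int) (keys : List Int) (out : PySem.Dict String Int) :
    PySem.Dict String Int :=
  match keys with
  | [] => out
  | k :: ks =>
      let label := if bin_size ≤ 1 then PySem.Int.toStr k
        else
          let lo := k * bin_size
          PySem.Int.toStr lo ++ "-" ++ PySem.Int.toStr (lo + bin_size - 1)
      pvLoopB bin_size ((k :: ks).filter (fun x => x ≠ k))
        (out.insert label (PySem.List.count (k :: ks) k))
  termination_by keys.length
  decreasing_by
    simp only [List.filter_cons, ne_eq, not_true_eq_false, decide_false,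
      List.length_cons]
    exact Nat.lt_succ_of_le (List.length_filter_le _ _)

def histogram_binned_alt (values : List Int) (bin_size : Int) : List (String × Int) :=
  let keys := if bin_size ≤ 1 then values.map (fun v => v)
    else values.map (fun v => PySem.Int.floordiv v bin_size)
  (pvLoopB bin_size keys PySem.Dict.empty).items

-- ===== PRECONDITION & SPEC =====
def Spec_histogram_binned (values : List Int) (bin_size : Int) (out : List (String × Int)) : Prop := out = histogram_binned_alt values bin_size
instance (values : List Int) (bin_size : Int) (out : List (String × Int)) : Decidable (Spec_histogram_binned values bin_size out) := by unfold Spec_histogram_binned; infer_instance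

-- ===== CLAIM (what is proved, stated in full; the proofs are below) =====
def Claim_equal_histogram_binned : Prop := ∀ (values : List Int) (bin_size : Int), Dom_histogram_binned values bin_size → Spec_histogram_binned values bin_size (histogram_binned values bin_size)

-- ===== LEMMAS AND PROOFS =====

-- str(n)'s digit characters: injectivity and absence of '-' past position 0.
theorem pv_digitChar_inj : ∀ a < 10, ∀ b < 10, Nat.digitChar a = Nat.digitChar b → a = b := by decide

theorem pv_toDigits10_inj (m : Nat) : ∀ n, Nat.toDigits 10 m = Nat.toDigits 10 n → m = n := by
  induction m using Nat.strong_induction_on with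
  | _ m ih =>
    intro n h
    rw [Nat.toDigits_eq_if (by norm_num), Nat.toDigits_eq_if (b := 10) (n := n) (by norm_num)] at h
    split_ifs at h with h1 h2 h2
    · exact pv_digitChar_inj m h1 n h2 (List.cons_eq_cons.mp h).1
    · exfalso
      have hl := congrArg List.length h
      have hp : 0 < (Nat.toDigits 10 (n / 10)).length := Nat.length_toDigits_pos
      simp only [List.length_append, List.length_cons, List.length_nil] at hl
      omega
    · exfalso
      have hl := congrArg List.length h
      have hp : 0 < (Nat.toDigits 10 (m / 10)).length := Nat.length_toDigits_pos
      simp only [List.length_append, List.length_cons, List.length_nil] at hl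
      omega
    · obtain ⟨h3, h4⟩ := List.append_inj' h (by simp)
      have hd : m / 10 = n / 10 := ih (m / 10) (by omega) _ h3
      have hm : m % 10 = n % 10 :=
        pv_digitChar_inj _ (Nat.mod_lt _ (by norm_num)) _ (Nat.mod_lt _ (by norm_num))
          (List.cons_eq_cons.mp h4).1
      omega

theorem pv_toDigits10_ne_dash {n : Nat} {c : Char} (hc : c ∈ Nat.toDigits 10 n) : c ≠ '-' := by
  have h := Nat.isDigit_of_mem_toDigits (by norm_num) (by norm_num) hc
  intro he; subst he; simp [Char.isDigit] at h

theorem pv_toDigits10_ne_nil (n : Nat) : Nat.toDigits 10 n ≠ [] := by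
  have := Nat.length_toDigits_pos (b := 10) (n := n)
  intro h; simp [h] at this

theorem pv_toChars_inj : Function.Injective PySem.Int.toChars := by
  intro a b h
  unfold PySem.Int.toChars at h
  split_ifs at h with ha hb hb
  · have := pv_toDigits10_inj _ _ (List.cons_eq_cons.mp h).2
    omega
  · exfalso
    have : '-' ∈ Nat.toDigits 10 b.toNat := by rw [← h]; exact List.mem_cons_self
    exact pv_toDigits10_ne_dash this rfl
  · exfalso
    have : '-' ∈ Nat.toDigits 10 a.toNat := by rw [h]; exact List.mem_cons_self
    exact pv_toDigits10_ne_dash this rfl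
  · have := pv_toDigits10_inj _ _ h
    omega

theorem pv_toStr_inj : Function.Injective PySem.Int.toStr := by
  intro a b h
  apply pv_toChars_inj
  rw [← PySem.Int.toList_toStr, ← PySem.Int.toList_toStr, h]

theorem pv_toChars_ne_nil (n : Int) : PySem.Int.toChars n ≠ [] := by
  unfold PySem.Int.toChars
  split_ifs
  · simp
  · exact pv_toDigits10_ne_nil _

theorem pv_toChars_drop_ne_dash (n : Int) : ∀ c ∈ (PySem.Int.toChars n).drop 1, c ≠ '-' := by
  intro c hc
  unfold PySem.Int.toChars at hc
  split_ifs at hc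
  · exact pv_toDigits10_ne_dash (by simpa using hc)
  · exact pv_toDigits10_ne_dash (List.mem_of_mem_drop hc)

-- splitting a string at the separating '-' is unambiguous when neither side has '-' past position 0
theorem pv_dash_split_aux (a : List Char) : ∀ (a' c c' : List Char),
    (∀ x ∈ a, x ≠ '-') → (∀ x ∈ a', x ≠ '-') →
    a ++ '-' :: c = a' ++ '-' :: c' → a = a' ∧ c = c' := by
  induction a with
  | nil =>
    intro a' c c' _ ha' h
    cases a' with
    | nil => simpa using h
    | cons y ys =>
      exfalso
      simp only [List.nil_append, List.cons_append] at h
      exact ha' y (by simp) (List.cons_eq_cons.mp h).1.symm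
  | cons x xs ih =>
    intro a' c c' ha ha' h
    cases a' with
    | nil =>
      exfalso
      simp only [List.nil_append, List.cons_append] at h
      exact ha x (by simp) (List.cons_eq_cons.mp h).1
    | cons y ys =>
      simp only [List.cons_append] at h
      obtain ⟨hxy, ht⟩ := List.cons_eq_cons.mp h
      have := ih ys c c' (fun z hz => ha z (by simp [hz])) (fun z hz => ha' z (by simp [hz])) ht
      exact ⟨by simp [hxy, this.1], this.2⟩

theorem pv_dash_split {a a' c c' : List Char} (ha0 : a ≠ []) (ha0' : a' ≠ [])
    (ha : ∀ x ∈ a.drop 1, x ≠ '-') (ha' : ∀ x ∈ a'.drop 1, x ≠ '-')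
    (h : a ++ '-' :: c = a' ++ '-' :: c') : a = a' ∧ c = c' := by
  obtain ⟨x, xs, rfl⟩ := List.exists_cons_of_ne_nil ha0
  obtain ⟨y, ys, rfl⟩ := List.exists_cons_of_ne_nil ha0'
  simp only [List.cons_append] at h
  obtain ⟨hxy, ht⟩ := List.cons_eq_cons.mp h
  have := pv_dash_split_aux xs ys c c' (by simpa using ha) (by simpa using ha') ht
  exact ⟨by simp [hxy, this.1], this.2⟩

-- the label "lo-hi" used for bucket k (bin_size > 1 branch)
def pvLabel (bin_size k : Int) : String :=
  PySem.Int.toStr (k * bin_size) ++ "-" ++ PySem.Int.toStr (k * bin_size + bin_size - 1)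

theorem pv_label_inj (bin_size : Int) (hbs : 0 < bin_size) :
    Function.Injective (pvLabel bin_size) := by
  intro k k' h
  unfold pvLabel at h
  have h' : PySem.Int.toChars (k * bin_size) ++ '-' :: PySem.Int.toChars (k * bin_size + bin_size - 1)
      = PySem.Int.toChars (k' * bin_size) ++ '-' :: PySem.Int.toChars (k' * bin_size + bin_size - 1) := by
    have := congrArg String.toList h
    simpa [String.toList_append, PySem.Int.toStr, String.toList_ofList] using this
  have hs := pv_dash_split (pv_toChars_ne_nil _) (pv_toChars_ne_nil _)
    (pv_toChars_drop_ne_dash _) (pv_toChars_drop_ne_dash _) h'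
  have := pv_toChars_inj hs.1
  exact mul_right_cancel₀ (ne_of_gt hbs) this

-- PySem.Set.ofList commutes with an injective map
theorem pv_add_map {f : Int → String} (hf : Function.Injective f) (s : PySem.Set String)
    (l : PySem.Set Int) (hs : s = l.map f) (x : Int) :
    PySem.Set.add s (f x) = (PySem.Set.add l x).map f := by
  subst hs
  unfold PySem.Set.add
  by_cases hx : x ∈ l
  · simp [List.mem_map_of_injective hf, hx, PySem.Set.contains]
  · simp [List.mem_map_of_injective hf, hx, PySem.Set.contains]

theorem pv_ofList_map_foldl {f : Int → String} (hf : Function.Injective f) (xs : List Int) :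
    ∀ (s : PySem.Set String) (l : PySem.Set Int), s = l.map f →
      (xs.map f).foldl PySem.Set.add s = (xs.foldl PySem.Set.add l).map f := by
  induction xs with
  | nil => intro s l h; simpa using h
  | cons x t ih =>
    intro s l h
    simp only [List.map_cons, List.foldl_cons]
    exact ih _ _ (by rw [h, pv_add_map hf _ _ rfl])

theorem pv_ofList_map {f : Int → String} (hf : Function.Injective f) (xs : List Int) :
    PySem.Set.ofList (xs.map f) = (PySem.Set.ofList xs).map f := by
  rw [PySem.Set.ofList_eq_foldl, PySem.Set.ofList_eq_foldl]
  exact pv_ofList_map_foldl hf xs [] [] rfl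

-- A's dict of running counts, as distinct keys with their counts
theorem pv_histA (lab : Int → String) (hlab : Function.Injective lab) (keys : List Int) :
    ((keys.map lab).foldl (fun (out : PySem.Dict String Int) s =>
        out.insert s (out.getD s 0 + 1)) PySem.Dict.empty).items
    = (PySem.Set.ofList keys).map (fun k => (lab k, (keys.count k : Int))) := by
  rw [PySem.Dict.foldl_insert_getD_add_one_eq_counter, PySem.Dict.items_counter,
    pv_ofList_map hlab]
  rw [List.map_map]
  apply List.map_congr_left
  intro k _
  have hcnt : List.count (lab k) (keys.map lab) = keys.count k :=
    List.count_map_of_injective _ lab hlab k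
  simp [Function.comp, hcnt]

-- set(keys) splits as head :: set of the filtered tail
theorem pv_foldl_add_filter (ks : List Int) (k : Int) : ∀ (s : PySem.Set Int), k ∈ s →
    (ks.filter (fun x => x ≠ k)).foldl PySem.Set.add s = ks.foldl PySem.Set.add s := by
  induction ks with
  | nil => intro s _; rfl
  | cons x t ih =>
    intro s hk
    by_cases hx : x = k
    · subst hx
      have hadd : PySem.Set.add s x = s := by
        unfold PySem.Set.add PySem.Set.contains
        simp [hk]
      simp only [List.filter_cons, ne_eq, not_true_eq_false, decide_false,
        List.foldl_cons, hadd]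
      exact ih s hk
    · simp only [List.filter_cons, ne_eq, hx, not_false_eq_true, decide_true, List.foldl_cons]
      apply ih
      unfold PySem.Set.add
      split
      · exact hk
      · exact List.mem_append_left _ hk

theorem pv_foldl_add_cons (l : List Int) : ∀ (s : PySem.Set Int) (k : Int),
    (∀ x ∈ l, x ≠ k) → l.foldl PySem.Set.add (k :: s) = k :: l.foldl PySem.Set.add s := by
  induction l with
  | nil => intro s k _; rfl
  | cons x t ih =>
    intro s k hne
    have hx : x ≠ k := hne x (by simp)
    have hadd : PySem.Set.add (k :: s) x = k :: PySem.Set.add s x := by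
      unfold PySem.Set.add PySem.Set.contains
      simp [hx]
      split <;> simp
    simp only [List.foldl_cons, hadd]
    exact ih _ _ (fun z hz => hne z (by simp [hz]))

theorem pv_ofList_cons_filter (k : Int) (ks : List Int) :
    PySem.Set.ofList (k :: ks) = k :: PySem.Set.ofList (ks.filter (fun x => x ≠ k)) := by
  rw [PySem.Set.ofList_eq_foldl, PySem.Set.ofList_eq_foldl]
  have h0 : PySem.Set.add ([] : PySem.Set Int) k = [k] := rfl
  simp only [List.foldl_cons, h0]
  rw [← pv_foldl_add_filter ks k [k] (by simp)]
  exact pv_foldl_add_cons _ _ _ (fun x hx => by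
    have := List.of_mem_filter hx
    simpa using this)

-- B's partition loop computes exactly the distinct keys with their counts
theorem pv_loopB (bin_size : Int) (lab : Int → String)
    (hlab : ∀ k, (if bin_size ≤ 1 then PySem.Int.toStr k
        else PySem.Int.toStr (k * bin_size) ++ "-" ++ PySem.Int.toStr (k * bin_size + bin_size - 1)) = lab k)
    (hinj : Function.Injective lab) :
    ∀ n (keys : List Int), keys.length ≤ n → ∀ (out : PySem.Dict String Int),
      out.keys.Nodup → (∀ k ∈ keys, out.contains (lab k) = false) →
      (pvLoopB bin_size keys out).items
        = out.items ++ (PySem.Set.ofList keys).map (fun k => (lab k, (keys.count k : Int))) := by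
  intro n
  induction n with
  | zero =>
    intro keys hlen out _ _
    have : keys = [] := List.eq_nil_of_length_eq_zero (Nat.le_zero.mp hlen)
    subst this
    simp [pvLoopB, PySem.Set.ofList]
  | succ n ih =>
    intro keys hlen out hnd hfresh
    match keys with
    | [] => simp [pvLoopB, PySem.Set.ofList]
    | k :: ks =>
      rw [pvLoopB]
      simp only [hlab k]
      have hfk : out.contains (lab k) = false := hfresh k (by simp)
      have hflt : (k :: ks).filter (fun x => x ≠ k) = ks.filter (fun x => x ≠ k) := by
        simp
      rw [hflt]
      have hlen' : (ks.filter (fun x => x ≠ k)).length ≤ n := by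
        have := List.length_filter_le (fun x => decide (x ≠ k)) ks
        simp only [List.length_cons] at hlen
        omega
      rw [ih _ hlen' _ (PySem.Dict.nodup_keys_insert _ _ _ hnd)
        (by
          intro j hj
          have hjk : j ≠ k := by simpa using (List.of_mem_filter hj)
          rw [PySem.Dict.contains_insert]
          have : lab j ≠ lab k := fun he => hjk (hinj he)
          simp only [ne_eq] at *
          simp [this, hfresh j (by simp [List.mem_of_mem_filter hj])])]
      rw [PySem.Dict.items_insert_of_not_contains _ _ hfk]
      have hmap : (PySem.Set.ofList (ks.filter (fun x => x ≠ k))).map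
            (fun j => (lab j, ((ks.filter (fun x => x ≠ k)).count j : Int)))
          = (PySem.Set.ofList (ks.filter (fun x => x ≠ k))).map
            (fun j => (lab j, ((k :: ks).count j : Int))) := by
        apply List.map_congr_left
        intro j hj
        have hjmem : j ∈ ks.filter (fun x => x ≠ k) := by
          exact (PySem.Set.mem_ofList _ _).mp hj
        have hjk : j ≠ k := by simpa using (List.of_mem_filter hjmem)
        have hc : (ks.filter (fun x => x ≠ k)).count j = (k :: ks).count j := by
          simp [List.count_filter, hjk, Ne.symm hjk]
        rw [hc]
      rw [hmap, pv_ofList_cons_filter, List.map_cons, List.append_assoc,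
        List.singleton_append]
      have hhead : (PySem.List.count (k :: ks) k : Int) = (((k :: ks).count k : Nat) : Int) := by
        simp [PySem.List.count_eq]
      rw [hhead]

-- A's lo for value v reduces to (v // bin_size) * bin_size, independent of start
theorem pv_lo_eq (bin_size m v : Int) (hbs : 0 < bin_size) :
    (PySem.Int.floordiv m bin_size) * bin_size
      + (PySem.Int.floordiv (v - (PySem.Int.floordiv m bin_size) * bin_size) bin_size) * bin_size
    = (PySem.Int.floordiv v bin_size) * bin_size := by
  rw [PySem.Int.floordiv_eq_ediv_of_pos hbs, PySem.Int.floordiv_eq_ediv_of_pos hbs,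
    PySem.Int.floordiv_eq_ediv_of_pos hbs]
  have h : v - m / bin_size * bin_size = v + (-(m / bin_size)) * bin_size := by ring
  rw [h, Int.add_mul_ediv_right _ _ (ne_of_gt hbs)]
  ring

-- ===== VERDICT (by name: the statement is the Claim_ definition above) =====
theorem histogram_binned_spec : Claim_equal_histogram_binned := by
  intro values bin_size _dom
  unfold Spec_histogram_binned
  by_cases hbs : bin_size ≤ 1
  · have hB : histogram_binned_alt values bin_size
        = (pvLoopB bin_size (values.map (fun v => v)) PySem.Dict.empty).items := by
      simp [histogram_binned_alt, hbs]
    rw [hB, pv_loopB bin_size PySem.Int.toStr (fun k => by simp [hbs]) pv_toStr_inj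
      (values.map (fun v => v)).length _ le_rfl _ PySem.Dict.nodup_keys_empty
      (fun k _ => PySem.Dict.contains_empty _)]
    by_cases hv : values = []
    · subst hv; simp [histogram_binned, PySem.Dict.empty, PySem.Set.ofList]
    · simp only [histogram_binned, hv, if_false, if_pos hbs]
      have := pv_histA PySem.Int.toStr pv_toStr_inj values
      simp only [List.foldl_map] at this
      rw [this]
      simp [PySem.Dict.empty]
  · have hpos : 0 < bin_size := by omega
    have hB : histogram_binned_alt values bin_size
        = (pvLoopB bin_size (values.map (fun v => PySem.Int.floordiv v bin_size))
            PySem.Dict.empty).items := by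
      simp [histogram_binned_alt, hbs]
    rw [hB, pv_loopB bin_size (pvLabel bin_size)
      (fun k => by simp [hbs, pvLabel]) (pv_label_inj bin_size hpos)
      (values.map (fun v => PySem.Int.floordiv v bin_size)).length _ le_rfl _
      PySem.Dict.nodup_keys_empty (fun k _ => PySem.Dict.contains_empty _)]
    by_cases hv : values = []
    · subst hv; simp [histogram_binned, PySem.Dict.empty, PySem.Set.ofList]
    · obtain ⟨v0, vs, rfl⟩ := List.exists_cons_of_ne_nil hv
      simp only [histogram_binned, if_neg hbs, reduceCtorEq, if_false]
      have hfun : (fun (out : PySem.Dict String Int) v =>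
          let bucket := PySem.Int.floordiv
            (v - (PySem.Int.floordiv (vs.foldl min v0) bin_size) * bin_size) bin_size
          let lo := (PySem.Int.floordiv (vs.foldl min v0) bin_size) * bin_size
            + bucket * bin_size
          let hi := lo + bin_size - 1
          let label := PySem.Int.toStr lo ++ "-" ++ PySem.Int.toStr hi
          out.insert label (out.getD label 0 + 1))
          = fun (out : PySem.Dict String Int) v =>
              out.insert (pvLabel bin_size (PySem.Int.floordiv v bin_size))
                (out.getD (pvLabel bin_size (PySem.Int.floordiv v bin_size)) 0 + 1) := by
        funext out v
        simp only [pvLabel]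
        rw [pv_lo_eq bin_size (vs.foldl min v0) v hpos]
      rw [hfun]
      have := pv_histA (pvLabel bin_size) (pv_label_inj bin_size hpos)
        ((v0 :: vs).map (fun v => PySem.Int.floordiv v bin_size))
      simp only [List.map_map] at this
      have h2 : ((v0 :: vs).map ((pvLabel bin_size) ∘ fun v => PySem.Int.floordiv v bin_size)).foldl
          (fun (out : PySem.Dict String Int) s => out.insert s (out.getD s 0 + 1)) PySem.Dict.empty
          = (v0 :: vs).foldl (fun (out : PySem.Dict String Int) v =>
              out.insert (pvLabel bin_size (PySem.Int.floordiv v bin_size))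
                (out.getD (pvLabel bin_size (PySem.Int.floordiv v bin_size)) 0 + 1))
            PySem.Dict.empty := by
        rw [List.foldl_map]; rfl
      rw [← h2]
      rw [this]
      simp [PySem.Dict.empty]
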